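-- pv_equiv track=rewrite | github.com/tedlaz/fpa2022 | isozygio_parse.py | filter_low_level
-- ===== SOURCE A (Python) =====
-- def filter_low_level(accounts: list) -> list:
--     low_level = []
--     for i, acc in enumerate(accounts):
--         if i == 0:
--             low_level.append(acc)
--             continue
--         if acc.startswith(low_level[-1]):
--             low_level.pop()
--             low_level.append(acc)
--             continue
--         else:
--             low_level.append(acc)
--     return low_level
-- ===== SOURCE B (Python) =====
-- def filter_low_level(accounts: list) -> list:
--     if not accounts:
--         return []
--     kept = [a for a, nxt in zip(accounts, accounts[1:]) if not nxt.startswith(a)]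
--     kept.append(accounts[-1])
--     return kept
-- ===== Notes on version B (the rewrite author's own statement) =====
-- stated objective: simpler
-- what changed: Replaces A's stack-like accumulator with pop/append by a stateless look-ahead filter over adjacent pairs (keep accounts[i] unless accounts[i+1] starts with it) plus the final element.
import Mathlib
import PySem

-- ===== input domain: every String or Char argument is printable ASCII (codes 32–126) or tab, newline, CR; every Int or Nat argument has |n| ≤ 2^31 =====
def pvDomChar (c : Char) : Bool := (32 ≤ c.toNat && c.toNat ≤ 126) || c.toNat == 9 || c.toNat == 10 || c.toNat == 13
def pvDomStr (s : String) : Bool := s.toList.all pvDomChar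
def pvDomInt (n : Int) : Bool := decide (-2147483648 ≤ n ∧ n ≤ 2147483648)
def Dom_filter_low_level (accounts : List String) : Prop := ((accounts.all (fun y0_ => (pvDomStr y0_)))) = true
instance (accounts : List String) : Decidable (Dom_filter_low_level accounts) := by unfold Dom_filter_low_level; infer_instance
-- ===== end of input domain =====

-- B replaces A's pop/append accumulator by a stateless look-ahead filter over adjacent pairs (simpler decomposition, same cost).


-- ===== PORT A =====
-- Literal transliteration of A: enumerate + accumulator list; low_level[-1] read with
-- default "" (the list is provably non-empty when that branch runs, so the default is never used,
-- matching Python where low_level[-1] cannot raise there); pop() at end = dropLast.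
def filter_low_level (accounts : List String) : List String :=
  (PySem.List.enumerate accounts).foldl
    (fun low_level p =>
      if p.1 == 0 then low_level ++ [p.2]
      else if PySem.Str.startswith p.2 (PySem.List.pyGetD low_level (-1) "") then
        low_level.dropLast ++ [p.2]
      else low_level ++ [p.2])
    []

-- ===== PORT B =====
-- Literal transliteration of B: look-ahead filter over adjacent pairs, then append the last element.
def filter_low_level_alt (accounts : List String) : List String :=
  match accounts with
  | [] => []
  | a :: rest =>
    (((a :: rest).zip rest).filter (fun q => !(PySem.Str.startswith q.2 q.1))).map Prod.fst
      ++ [(a :: rest).getLast (List.cons_ne_nil a rest)]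

-- ===== PRECONDITION & SPEC =====
def Spec_filter_low_level (accounts : List String) (out : List String) : Prop := out = filter_low_level_alt accounts
instance (accounts : List String) (out : List String) : Decidable (Spec_filter_low_level accounts out) := by unfold Spec_filter_low_level; infer_instance

-- ===== CLAIM (what is proved, stated in full; the proofs are below) =====
def Claim_equal_filter_low_level : Prop := ∀ (accounts : List String), Dom_filter_low_level accounts → Spec_filter_low_level accounts (filter_low_level accounts)

-- ===== LEMMAS AND PROOFS =====

-- Characterisation of the tail of the loop: previous element p, remaining elements.
def pvG (p : String) : List String → List String
  | [] => [p]
  | x :: xs => if PySem.Str.startswith x p then pvG x xs else p :: pvG x xs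

-- A's fold over the tail (indices ≥ 1) computes pvG.
theorem pvA_fold (rest : List String) : ∀ (k : Int) (pre : List String) (p : String), 1 ≤ k →
    (PySem.List.enumerate rest k).foldl
      (fun low_level q =>
        if q.1 == 0 then low_level ++ [q.2]
        else if PySem.Str.startswith q.2 (PySem.List.pyGetD low_level (-1) "") then
          low_level.dropLast ++ [q.2]
        else low_level ++ [q.2])
      (pre ++ [p]) = pre ++ pvG p rest := by
  induction rest with
  | nil => intro k pre p hk; simp [PySem.List.enumerate, pvG]
  | cons x xs ih =>
    intro k pre p hk
    rw [PySem.List.enumerate_cons]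
    simp only [List.foldl_cons]
    have hk0 : (k == 0) = false := by simp; omega
    rw [hk0]
    simp only [Bool.false_eq_true, if_false, PySem.List.pyGetD_neg_one_append_singleton]
    by_cases hs : PySem.Str.startswith x p = true
    · rw [if_pos hs]
      have : (pre ++ [p]).dropLast ++ [x] = pre ++ [x] := by simp
      rw [this, ih (k+1) pre x (by omega)]
      simp only [pvG, if_pos hs]
    · rw [if_neg hs]
      have : pre ++ [p] ++ [x] = (pre ++ [p]) ++ [x] := by simp
      rw [this, ih (k+1) (pre ++ [p]) x (by omega)]
      simp only [pvG, if_neg hs, List.append_assoc, List.cons_append, List.nil_append]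

-- B computes pvG.
theorem pvB_eq_pvG (rest : List String) : ∀ p, filter_low_level_alt (p :: rest) = pvG p rest := by
  induction rest with
  | nil => intro p; simp [filter_low_level_alt, pvG]
  | cons x xs ih =>
    intro p
    have h2 := ih x
    simp only [filter_low_level_alt] at h2 ⊢
    rw [List.zip_cons_cons, List.filter_cons]
    by_cases hs : PySem.Str.startswith x p = true
    · simp only [pvG, hs, Bool.not_true, Bool.false_eq_true, if_false]
      rw [List.getLast_cons (List.cons_ne_nil x xs)]
      exact h2
    · have hs' : PySem.Str.startswith x p = false := by simpa using hs
      simp only [pvG, hs', Bool.not_false, if_true, List.map_cons, List.cons_append]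
      rw [List.getLast_cons (List.cons_ne_nil x xs)]
      rw [h2]
      simp

-- ===== VERDICT (by name: the statement is the Claim_ definition above) =====
theorem filter_low_level_spec : Claim_equal_filter_low_level := by
  intro accounts _
  unfold Spec_filter_low_level
  cases accounts with
  | nil => rfl
  | cons a rest =>
    rw [pvB_eq_pvG]
    unfold filter_low_level
    rw [PySem.List.enumerate_cons]
    simp only [List.foldl_cons, beq_self_eq_true, if_true, List.nil_append]
    have := pvA_fold rest 1 [] a (by omega)
    simpa using this
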